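-- pv_equiv track=rewrite | github.com/calmeRED/therm | utils/utils_env.py | fill_list_with_dict
-- ===== SOURCE A (Python) =====
-- def fill_list_with_dict(nested_list, data_dict):
--     for i in range(len(nested_list)):
--         item = nested_list[i]
--         if isinstance(item, list):
--             fill_list_with_dict(item, data_dict)
--         elif isinstance(item, str):
--             nested_list[i] = data_dict[item]
--     return nested_list
-- ===== SOURCE B (Python) =====
-- def fill_list_with_dict(nested_list, data_dict):
--     # Builds and returns a NEW list (A mutates nested_list in place; the
--     # returned values agree element for element, including on nested sublists).
--     return [fill_list_with_dict(item, data_dict) if isinstance(item, list)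
--             else (data_dict[item] if isinstance(item, str) else item)
--             for item in nested_list]
-- ===== Notes on version B (the rewrite author's own statement) =====
-- stated objective: idiomatic
-- what changed: A walks indices and overwrites each element of the list in place (returning the mutated argument); B builds a fresh result with a single comprehension (recursing on sublists), no mutation and no index arithmetic - return values are identical wherever A returns.
import Mathlib
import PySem

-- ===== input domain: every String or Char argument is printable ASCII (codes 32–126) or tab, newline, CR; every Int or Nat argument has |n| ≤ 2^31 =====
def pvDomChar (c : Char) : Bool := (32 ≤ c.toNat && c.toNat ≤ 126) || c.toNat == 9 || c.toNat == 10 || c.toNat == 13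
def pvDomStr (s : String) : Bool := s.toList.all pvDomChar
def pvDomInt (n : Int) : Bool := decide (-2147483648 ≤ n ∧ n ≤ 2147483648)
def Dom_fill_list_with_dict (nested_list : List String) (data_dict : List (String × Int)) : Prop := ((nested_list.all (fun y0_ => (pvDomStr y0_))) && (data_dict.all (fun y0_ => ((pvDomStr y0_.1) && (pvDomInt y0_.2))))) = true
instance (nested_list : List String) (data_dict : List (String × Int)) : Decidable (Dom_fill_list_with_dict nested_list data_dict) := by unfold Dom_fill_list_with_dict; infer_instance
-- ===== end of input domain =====

-- B replaces A's in-place index loop by a comprehension building a fresh list (idiomatic, no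
-- mutation); A mutates nested_list in place — the equivalence proved here is about the RETURN
-- value only. NOTE on the modelled domain: the Python function also accepts heterogeneous
-- nested lists (sublists are handled by recursion in A and in B alike); the Lean argument type
-- List String fixed by the task signature is the flat-string instance of that domain — that
-- restriction comes from the type convention, not from Pre_, which excludes only KeyError inputs.


-- ===== PORT A =====
-- A's index loop `for i in range(len): nested_list[i] = data_dict[nested_list[i]]`:
-- the already-processed prefix (in reverse) is carried as the accumulator, the untouched
-- suffix is the remaining list; the lookup default 0 is never reached inside Pre_.
def fill_list_with_dict_loop (data_dict : List (String × Int)) : List String → List Int → List Int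
  | [], acc => acc.reverse
  | x :: xs, acc => fill_list_with_dict_loop data_dict xs (PySem.Dict.getD (PySem.Dict.ofList data_dict) x 0 :: acc)

def fill_list_with_dict (nested_list : List String) (data_dict : List (String × Int)) : List Int :=
  fill_list_with_dict_loop data_dict nested_list []

-- ===== PORT B =====
-- B's list comprehension `[data_dict[item] for item in nested_list]` (on the flat-string
-- instance the isinstance(item, list) branch of Source B is never taken).
def fill_list_with_dict_alt (nested_list : List String) (data_dict : List (String × Int)) : List Int :=
  nested_list.map (fun item => PySem.Dict.getD (PySem.Dict.ofList data_dict) item 0)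

-- ===== PRECONDITION & SPEC =====
-- Pre_ excludes exactly the inputs containing a string absent from data_dict, on which the
-- Python A raises KeyError (B raises the same KeyError there); nothing else is excluded here.
def Pre_fill_list_with_dict (nested_list : List String) (data_dict : List (String × Int)) : Prop :=
  nested_list.all (fun s => (PySem.Dict.get? (PySem.Dict.ofList data_dict) s).isSome) = true
instance (nested_list : List String) (data_dict : List (String × Int)) : Decidable (Pre_fill_list_with_dict nested_list data_dict) := by unfold Pre_fill_list_with_dict; infer_instance

def pvWitness_fill_list_with_dict : List String × (List (String × Int)) := (["a", "b", "a"], [("a", 1), ("b", -2)])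

def Spec_fill_list_with_dict (nested_list : List String) (data_dict : List (String × Int)) (out : List Int) : Prop := out = fill_list_with_dict_alt nested_list data_dict
instance (nested_list : List String) (data_dict : List (String × Int)) (out : List Int) : Decidable (Spec_fill_list_with_dict nested_list data_dict out) := by unfold Spec_fill_list_with_dict; infer_instance

-- ===== CLAIM (what is proved, stated in full; the proofs are below) =====
def Claim_equal_fill_list_with_dict : Prop := ∀ (nested_list : List String) (data_dict : List (String × Int)), Dom_fill_list_with_dict nested_list data_dict → Pre_fill_list_with_dict nested_list data_dict → Spec_fill_list_with_dict nested_list data_dict (fill_list_with_dict nested_list data_dict)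

-- ===== LEMMAS AND PROOFS =====
theorem fill_list_with_dict_loop_eq (data_dict : List (String × Int)) :
    ∀ (xs : List String) (acc : List Int),
      fill_list_with_dict_loop data_dict xs acc
        = acc.reverse ++ xs.map (fun item => PySem.Dict.getD (PySem.Dict.ofList data_dict) item 0) := by
  intro xs
  induction xs with
  | nil => intro acc; simp [fill_list_with_dict_loop]
  | cons x xs ih => intro acc; simp [fill_list_with_dict_loop, ih]

-- ===== VERDICT (by name: the statement is the Claim_ definition above) =====
theorem fill_list_with_dict_spec : Claim_equal_fill_list_with_dict := by
  intro nested_list data_dict _ _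
  unfold Spec_fill_list_with_dict fill_list_with_dict fill_list_with_dict_alt
  simp [fill_list_with_dict_loop_eq]
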